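-- pv_equiv track=rewrite | github.com/Louw115/neurop-forge | neurop_forge/sources/interval_utilities.py | partition_intervals
-- ===== SOURCE A (Python) =====
-- def partition_intervals(intervals: list, point) -> dict:
--     """Partition intervals by point."""
--     before = []
--     containing = []
--     after = []
--     for interval in intervals:
--         if interval["end"] < point:
--             before.append(interval)
--         elif interval["start"] > point:
--             after.append(interval)
--         else:
--             containing.append(interval)
--     return {"before": before, "containing": containing, "after": after}
-- ===== SOURCE B (Python) =====
-- def partition_intervals(intervals: list, point) -> dict:
--     """Partition intervals by point, by two staged binary splits.
--
--     Stage 1 splits the whole list into 'before' and the remainder; stage 2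
--     splits only that remainder into 'after' and 'containing'.  No interval is
--     ever tested with a 'containing' predicate: that bucket is the final
--     complement of the two splits.
--     """
--     def split(items, pred):
--         yes, no = [], []
--         for x in items:
--             (yes if pred(x) else no).append(x)
--         return yes, no
--
--     before, rest = split(intervals, lambda i: i["end"] < point)
--     after, containing = split(rest, lambda i: i["start"] > point)
--     return {"before": before, "containing": containing, "after": after}
-- ===== Notes on version B (the rewrite author's own statement) =====
-- stated objective: alternative
-- what changed: Replaces the single three-way classifying loop by two staged binary splits with a generic split helper: the whole list is first split into 'before' vs remainder, then only the remainder is split into 'after' vs 'containing', so 'containing' is obtained as a complement and never tested by its own predicate.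
import Mathlib
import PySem

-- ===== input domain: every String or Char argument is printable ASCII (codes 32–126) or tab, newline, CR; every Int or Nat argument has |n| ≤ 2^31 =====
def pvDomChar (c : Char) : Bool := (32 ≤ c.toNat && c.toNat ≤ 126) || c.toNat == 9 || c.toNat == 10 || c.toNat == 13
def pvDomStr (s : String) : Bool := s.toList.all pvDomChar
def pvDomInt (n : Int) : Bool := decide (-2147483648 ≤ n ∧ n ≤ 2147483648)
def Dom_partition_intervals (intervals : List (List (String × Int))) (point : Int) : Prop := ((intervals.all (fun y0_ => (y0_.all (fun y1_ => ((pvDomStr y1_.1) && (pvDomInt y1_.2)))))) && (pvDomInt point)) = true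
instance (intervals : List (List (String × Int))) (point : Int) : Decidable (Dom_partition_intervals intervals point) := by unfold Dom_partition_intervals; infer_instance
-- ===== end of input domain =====

-- B replaces A's single three-way classifying loop by two staged binary splits
-- (a generic split helper; 'containing' is the final complement, never tested
-- by its own predicate). Objective: alternative decomposition, same cost.
-- Python dict lookup interval[k] = first match in the association list; 0 is a dummy
-- default never reached inside Pre_ (where every needed key is present).
def pvLookD (iv : List (String × Int)) (k : String) : Int := (List.lookup k iv).getD 0

-- ===== PORT A =====
def partition_intervals (intervals : List (List (String × Int))) (point : Int) : List (String × List (List (String × Int))) :=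
  let st := intervals.foldl (fun (s : List (List (String × Int)) × List (List (String × Int)) × List (List (String × Int))) interval =>
      let (before, containing, after) := s
      if pvLookD interval "end" < point then (before ++ [interval], containing, after)
      else if pvLookD interval "start" > point then (before, containing, after ++ [interval])
      else (before, containing ++ [interval], after))
    ([], [], [])
  [("before", st.1), ("containing", st.2.1), ("after", st.2.2)]

-- ===== PORT B =====
-- B's generic binary split helper (the Python 'split' inner function).
def pvSplit (items : List (List (String × Int))) (pred : List (String × Int) → Bool) :
    List (List (String × Int)) × List (List (String × Int)) :=
  items.foldl (fun (s : List (List (String × Int)) × List (List (String × Int))) x =>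
      if pred x then (s.1 ++ [x], s.2) else (s.1, s.2 ++ [x])) ([], [])

def partition_intervals_alt (intervals : List (List (String × Int))) (point : Int) : List (String × List (List (String × Int))) :=
  let s1 := pvSplit intervals (fun i => decide (pvLookD i "end" < point))
  let s2 := pvSplit s1.2 (fun i => decide (pvLookD i "start" > point))
  [("before", s1.1), ("containing", s2.2), ("after", s2.1)]

-- ===== PRECONDITION & SPEC =====
-- Pre_ excludes exactly the inputs where Python A raises KeyError: an interval missing
-- the "end" key, or missing the "start" key when its "end" value is ≥ point.
def Pre_partition_intervals (intervals : List (List (String × Int))) (point : Int) : Prop :=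
  (intervals.all (fun iv =>
    match List.lookup "end" iv with
    | none => false
    | some e => decide (e < point) || (List.lookup "start" iv).isSome)) = true
instance (intervals : List (List (String × Int))) (point : Int) : Decidable (Pre_partition_intervals intervals point) := by unfold Pre_partition_intervals; infer_instance
def pvWitness_partition_intervals : (List (List (String × Int))) × Int :=
  ([[("start", 0), ("end", 2)], [("start", 5), ("end", 9)], [("end", -3), ("start", -1)]], 4)

def Spec_partition_intervals (intervals : List (List (String × Int))) (point : Int) (out : List (String × List (List (String × Int)))) : Prop := out = partition_intervals_alt intervals point
instance (intervals : List (List (String × Int))) (point : Int) (out : List (String × List (List (String × Int)))) : Decidable (Spec_partition_intervals intervals point out) := by unfold Spec_partition_intervals; infer_instance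

-- ===== CLAIM (what is proved, stated in full; the proofs are below) =====
def Claim_equal_partition_intervals : Prop := ∀ (intervals : List (List (String × Int))) (point : Int), Dom_partition_intervals intervals point → Pre_partition_intervals intervals point → Spec_partition_intervals intervals point (partition_intervals intervals point)

-- ===== LEMMAS AND PROOFS =====
-- A's three-way fold computes the three filters.
theorem partition_foldl_filter (point : Int) (xs : List (List (String × Int)))
    (b c a : List (List (String × Int))) :
    xs.foldl (fun (s : List (List (String × Int)) × List (List (String × Int)) × List (List (String × Int))) interval =>
      let (before, containing, after) := s
      if pvLookD interval "end" < point then (before ++ [interval], containing, after)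
      else if pvLookD interval "start" > point then (before, containing, after ++ [interval])
      else (before, containing ++ [interval], after)) (b, c, a)
    = (b ++ xs.filter (fun i => decide (pvLookD i "end" < point)),
       c ++ xs.filter (fun i => !decide (pvLookD i "end" < point) && !decide (pvLookD i "start" > point)),
       a ++ xs.filter (fun i => !decide (pvLookD i "end" < point) && decide (pvLookD i "start" > point))) := by
  induction xs generalizing b c a with
  | nil => simp
  | cons x xs ih =>
    by_cases he : pvLookD x "end" < point
    · simp [List.foldl_cons, he, ih]
    · by_cases hs : pvLookD x "start" > point
      · simp [List.foldl_cons, he, hs, ih]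
      · simp [List.foldl_cons, he, hs, ih]

-- B's binary-split fold computes (filter pred, filter ¬pred).
theorem pvSplit_eq_filter (xs : List (List (String × Int))) (pred : List (String × Int) → Bool) :
    pvSplit xs pred = (xs.filter pred, xs.filter (fun x => !pred x)) := by
  unfold pvSplit
  suffices h : ∀ (y n : List (List (String × Int))),
      xs.foldl (fun (s : List (List (String × Int)) × List (List (String × Int))) x =>
        if pred x then (s.1 ++ [x], s.2) else (s.1, s.2 ++ [x])) (y, n)
      = (y ++ xs.filter pred, n ++ xs.filter (fun x => !pred x)) by
    simpa using h [] []
  induction xs with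
  | nil => simp
  | cons x xs ih =>
    intro y n
    by_cases hp : pred x
    · simp [List.foldl_cons, hp, ih]
    · simp [List.foldl_cons, hp, ih]

-- ===== VERDICT (by name: the statement is the Claim_ definition above) =====
theorem partition_intervals_spec : Claim_equal_partition_intervals := by
  intro intervals point _ _
  unfold Spec_partition_intervals partition_intervals partition_intervals_alt
  simp only [partition_foldl_filter, pvSplit_eq_filter]
  simp [List.filter_filter, Bool.and_comm]
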